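-- pv_equiv track=rewrite | github.com/Runarok/GeeksForGeeks-solutions | Difficulty: Medium/Maximum distinct elements after removing K elements/maximum-distinct-elements-after-removing-k-elements.py | maxDistinctNum
-- ===== SOURCE A (Python) =====
-- from collections import Counter
--
-- def maxDistinctNum(arr, k):
--     """
--     Function to find the maximum number of distinct integers
--     that can remain after performing at most k deletions.
--
--     :param arr: List of integers
--     :param k: Maximum number of deletions allowed
--     :return: Maximum distinct integers count after deletions
--     """
--     freq = Counter(arr)  # Count frequency of each element
--     freq_values = sorted(freq.items(), key=lambda x: x[1], reverse=True)  # Sort by frequency (descending)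
--
--     deletions = 0  # Track the number of elements deleted
--
--     # Reduce counts of elements with duplicates
--     for value, count in freq_values:
--         if count > 1:
--             to_remove = min(k - deletions, count - 1)  # Determine how many occurrences to remove
--             deletions += to_remove
--             freq[value] -= to_remove
--         if deletions == k:  # Stop if we reach max deletions
--             break
--
--     # Remove elements entirely if we still have remaining deletions
--     if deletions < k:
--         for key in list(freq.keys()):
--             if deletions == k:
--                 break
--             deletions += 1
--             del freq[key]  # Remove the element entirely
--
--     return len(freq)  # Return count of distinct numbers left
-- ===== SOURCE B (Python) =====
-- def maxDistinctNum(arr, k):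
--     # Closed form: removing duplicates first costs n - d deletions (d = distinct
--     # count); if k fits in that budget all d distinct values survive, otherwise
--     # each extra deletion kills one distinct value: max(n - k, 0).
--     n = len(arr)
--     d = len(set(arr))
--     if k <= n - d:
--         return d
--     return max(n - k, 0)
-- ===== Notes on version B (the rewrite author's own statement) =====
-- stated objective: faster
-- what changed: Replaced the Counter + sort-by-frequency + two mutation loops with a closed-form formula over n = len(arr) and d = len(set(arr)).
import Mathlib
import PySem

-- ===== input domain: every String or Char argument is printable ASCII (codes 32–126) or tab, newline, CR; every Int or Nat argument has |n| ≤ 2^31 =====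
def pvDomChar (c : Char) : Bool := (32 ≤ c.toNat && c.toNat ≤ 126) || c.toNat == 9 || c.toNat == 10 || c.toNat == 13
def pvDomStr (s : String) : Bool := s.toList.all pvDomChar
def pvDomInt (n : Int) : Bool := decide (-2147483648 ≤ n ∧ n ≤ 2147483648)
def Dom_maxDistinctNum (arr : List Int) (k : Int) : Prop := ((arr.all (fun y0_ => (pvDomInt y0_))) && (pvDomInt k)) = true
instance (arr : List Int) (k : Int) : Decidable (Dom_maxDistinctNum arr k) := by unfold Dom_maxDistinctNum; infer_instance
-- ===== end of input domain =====

-- B replaces A's Counter + sort-by-frequency + two mutation loops by a closed form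
-- over n = len(arr) and d = len(set(arr)) (objective: faster).

-- ===== PORT A =====
-- first loop: 'for value, count in freq_values: if count > 1: …; if deletions == k: break'
-- state = (deletions, freq); 'freq[value] -= to_remove' is modify (key always present, so exact)
def pvLoop1 (k : Int) : List (Int × Int) → Int → PySem.Dict Int Int → Int × PySem.Dict Int Int
  | [], del, f => (del, f)
  | (v, c) :: rest, del, f =>
      if c > 1 then
        let toRemove := min (k - del) (c - 1)
        let del' := del + toRemove
        let f' := f.modify v 0 (fun x => x - toRemove)
        if del' = k then (del', f') else pvLoop1 k rest del' f'
      else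
        if del = k then (del, f) else pvLoop1 k rest del f

-- second loop: 'for key in list(freq.keys()): if deletions == k: break; deletions += 1; del freq[key]'
def pvLoop2 (k : Int) : List Int → Int → PySem.Dict Int Int → PySem.Dict Int Int
  | [], _, f => f
  | ky :: rest, del, f => if del = k then f else pvLoop2 k rest (del + 1) (f.erase ky)

def maxDistinctNum (arr : List Int) (k : Int) : Int :=
  let freq := PySem.Dict.counter arr
  let freqValues := PySem.List.sorted freq.items (fun p => p.2) true
  let r := pvLoop1 k freqValues 0 freq
  let freq' := if r.1 < k then pvLoop2 k r.2.keys r.1 r.2 else r.2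
  (freq'.size : Int)

-- ===== PORT B =====
def maxDistinctNum_alt (arr : List Int) (k : Int) : Int :=
  let n : Int := arr.length
  let d : Int := (PySem.Set.ofList arr).length
  if k ≤ n - d then d else max (n - k) 0

-- ===== PRECONDITION & SPEC =====
def Spec_maxDistinctNum (arr : List Int) (k : Int) (out : Int) : Prop := out = maxDistinctNum_alt arr k
instance (arr : List Int) (k : Int) (out : Int) : Decidable (Spec_maxDistinctNum arr k out) := by unfold Spec_maxDistinctNum; infer_instance

-- ===== CLAIM (what is proved, stated in full; the proofs are below) =====
def Claim_equal_maxDistinctNum : Prop := ∀ (arr : List Int) (k : Int), Dom_maxDistinctNum arr k → Spec_maxDistinctNum arr k (maxDistinctNum arr k)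

-- ===== LEMMAS AND PROOFS =====

-- deletions computed by loop 1 depend only on the counts
def pvDel (k : Int) : List Int → Int → Int
  | [], del => del
  | c :: rest, del =>
      if c > 1 then
        let del' := del + min (k - del) (c - 1)
        if del' = k then del' else pvDel k rest del'
      else
        if del = k then del else pvDel k rest del

theorem pvLoop1_fst (k : Int) : ∀ (l : List (Int × Int)) (del : Int) (f : PySem.Dict Int Int),
    (pvLoop1 k l del f).1 = pvDel k (l.map (·.2)) del := by
  intro l
  induction l with
  | nil => intro del f; rfl
  | cons p rest ih =>
      intro del f
      obtain ⟨v, c⟩ := p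
      simp only [pvLoop1, pvDel, List.map_cons]
      split_ifs <;> simp [ih]

theorem pvLoop1_keys (k : Int) : ∀ (l : List (Int × Int)) (del : Int) (f : PySem.Dict Int Int),
    (∀ p ∈ l, f.contains p.1 = true) → (pvLoop1 k l del f).2.keys = f.keys := by
  intro l
  induction l with
  | nil => intro del f _; rfl
  | cons p rest ih =>
      intro del f hc
      obtain ⟨v, c⟩ := p
      have hv : f.contains v = true := hc (v, c) (by simp)
      have hkeys : (f.modify v 0 (fun x => x - min (k - del) (c - 1))).keys = f.keys := by
        rw [PySem.Dict.keys_modify, PySem.Dict.keys_insert_of_contains f _ hv]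
      simp only [pvLoop1]
      split_ifs with h1 h2 h3
      · exact hkeys
      · rw [ih _ _ (fun q hq => by
          rw [PySem.Dict.contains_modify]
          simp [hc q (List.mem_cons_of_mem _ hq)]), hkeys]
      · rfl
      · exact ih _ _ (fun q hq => hc q (List.mem_cons_of_mem _ hq))

theorem sum_map_sub_one (l : List Int) : (l.map (fun c => c - 1)).sum = l.sum - l.length := by
  induction l with
  | nil => simp
  | cons c t ih => simp [ih]; ring

theorem pvDel_of_nonneg (k : Int) : ∀ (cs : List Int) (del : Int),
    (∀ c ∈ cs, 1 ≤ c) → del ≤ k →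
    pvDel k cs del = min k (del + (cs.map (fun c => c - 1)).sum) := by
  intro cs
  induction cs with
  | nil => intro del _ h; simp [pvDel]; omega
  | cons c rest ih =>
      intro del h1 h2
      have hc : 1 ≤ c := h1 c (by simp)
      have hrest : ∀ x ∈ rest, 1 ≤ x := fun x hx => h1 x (List.mem_cons_of_mem _ hx)
      have hsum : 0 ≤ (rest.map (fun c => c - 1)).sum := by
        apply List.sum_nonneg
        intro x hx
        obtain ⟨y, hy, rfl⟩ := List.mem_map.1 hx
        have := hrest y hy; omega
      simp only [pvDel, List.map_cons, List.sum_cons]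
      split_ifs with hgt heq heq0
      · omega
      · rw [ih _ hrest (by omega)]; omega
      · omega
      · rw [ih _ hrest h2]
        have : c = 1 := by omega
        omega

theorem pvDel_of_neg (k : Int) (hk : k < 0) : ∀ (cs : List Int),
    (∀ c ∈ cs, 1 ≤ c) → pvDel k cs 0 = k ∨ pvDel k cs 0 = 0 := by
  intro cs
  induction cs with
  | nil => intro _; right; rfl
  | cons c rest ih =>
      intro h1
      have hc : 1 ≤ c := h1 c (by simp)
      simp only [pvDel]
      split_ifs with hgt heq heq0
      · left; exact heq
      · exfalso; omega
      · left; exact heq0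
      · exact ih (fun x hx => h1 x (List.mem_cons_of_mem _ hx))

theorem erase_keys_cons (f : PySem.Dict Int Int) (ky : Int) (rest : List Int)
    (h : f.keys = ky :: rest) (hnd : (ky :: rest).Nodup) : (f.erase ky).keys = rest := by
  obtain ⟨items⟩ := f
  simp only [PySem.Dict.keys] at h
  have hky : ky ∉ rest := (List.nodup_cons.1 hnd).1
  cases items with
  | nil => simp at h
  | cons p t =>
      obtain ⟨k0, v0⟩ := p
      simp only [List.map_cons, List.cons.injEq] at h
      obtain ⟨rfl, ht⟩ := h
      simp only [PySem.Dict.erase, PySem.Dict.keys]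
      rw [List.filter_cons_of_neg (by simp)]
      have hfilter : t.filter (fun p => !p.1 == k0) = t := by
        apply List.filter_eq_self.2
        intro p hp
        have hmem : p.1 ∈ rest := by rw [← ht]; exact List.mem_map_of_mem hp
        have hne : p.1 ≠ k0 := fun hc => absurd (hc ▸ hmem) hky
        simp [hne]
      rw [hfilter, ht]

theorem pvLoop2_size (k : Int) : ∀ (ks : List Int) (del : Int) (f : PySem.Dict Int Int),
    f.keys = ks → ks.Nodup → del ≤ k →
    ((pvLoop2 k ks del f).size : Int) = max ((ks.length : Int) - (k - del)) 0 := by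
  intro ks
  induction ks with
  | nil =>
      intro del f h _ hle
      have : f.items.length = 0 := by
        have := congrArg List.length h
        simpa [PySem.Dict.keys] using this
      simp [pvLoop2, PySem.Dict.size, this]
      omega
  | cons ky rest ih =>
      intro del f h hnd hle
      simp only [pvLoop2]
      split_ifs with heq
      · have : f.items.length = rest.length + 1 := by
          have := congrArg List.length h
          simpa [PySem.Dict.keys] using this
        simp [PySem.Dict.size, this]
        omega
      · have hk' : (f.erase ky).keys = rest := erase_keys_cons f ky rest h hnd
        rw [ih (del + 1) (f.erase ky) hk' (List.nodup_cons.1 hnd).2 (by omega)]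
        simp only [List.length_cons]
        push_cast
        omega

-- the distinct values of arr, with their positive counts summing to arr.length
theorem set_counts_sum (arr : List Int) :
    ((PySem.Set.ofList arr).map (fun v => (List.count v arr : Int))).sum = (arr.length : Int) := by
  have hperm : (PySem.Set.ofList arr).Perm arr.dedup := by
    apply (List.perm_ext_iff_of_nodup (PySem.Set.nodup_ofList arr) arr.nodup_dedup).2
    intro x
    rw [PySem.Set.mem_ofList, List.mem_dedup]
  have h1 : ((PySem.Set.ofList arr).map (fun v => List.count v arr)).sum
      = ((arr.dedup.map (fun v => List.count v arr)).sum) :=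
    (hperm.map _).sum_eq
  have h2 : ((arr.dedup.map (fun v => List.count v arr)).sum) = arr.length :=
    List.sum_map_count_dedup_eq_length arr
  have : ((PySem.Set.ofList arr).map (fun v => (List.count v arr : Int))).sum
      = (((PySem.Set.ofList arr).map (fun v => List.count v arr)).sum : Int) := by
    push_cast
    rw [List.map_map]
    rfl
  rw [this, h1, h2]

-- ===== VERDICT (by name: the statement is the Claim_ definition above) =====
theorem maxDistinctNum_spec : Claim_equal_maxDistinctNum := by
  intro arr k _
  unfold Spec_maxDistinctNum
  simp only [maxDistinctNum, maxDistinctNum_alt]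
  set S := PySem.Set.ofList arr with hS
  set freq := PySem.Dict.counter arr with hfreq
  set freqValues := PySem.List.sorted freq.items (fun p => p.2) true with hfv
  set r := pvLoop1 k freqValues 0 freq with hr
  have hitems : freq.items = S.map (fun v => (v, (List.count v arr : Int))) :=
    PySem.Dict.items_counter arr
  have hkeysf : freq.keys = S := PySem.Dict.keys_counter arr
  have hpermItems : freqValues.Perm freq.items := PySem.List.sorted_perm _ _ _
  have hcontains : ∀ p ∈ freqValues, freq.contains p.1 = true := by
    intro p hp
    have hp' : p ∈ freq.items := hpermItems.mem_iff.1 hp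
    rw [hitems] at hp'
    obtain ⟨v, hv, rfl⟩ := List.mem_map.1 hp'
    rw [PySem.Dict.contains_iff_mem_keys, hkeysf]
    exact hv
  have hkeys1 : r.2.keys = S := by
    rw [hr, pvLoop1_keys k freqValues 0 freq hcontains, hkeysf]
  have hnd : S.Nodup := PySem.Set.nodup_ofList arr
  have hdlen : r.2.size = S.length := by
    have := congrArg List.length hkeys1
    simpa [PySem.Dict.keys, PySem.Dict.size] using this
  -- counts facts
  have hcountsPerm : (freqValues.map (·.2)).Perm (S.map (fun v => (List.count v arr : Int))) := by
    have := hpermItems.map (·.2)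
    rw [hitems, List.map_map] at this
    exact this
  have hpos : ∀ c ∈ freqValues.map (·.2), 1 ≤ c := by
    intro c hc
    have hc' : c ∈ S.map (fun v => (List.count v arr : Int)) := hcountsPerm.mem_iff.1 hc
    obtain ⟨v, hv, rfl⟩ := List.mem_map.1 hc'
    have : v ∈ arr := (PySem.Set.mem_ofList arr v).1 hv
    have := List.count_pos_iff.2 this
    omega
  have hsumc : (freqValues.map (·.2)).sum = (arr.length : Int) := by
    rw [hcountsPerm.sum_eq, set_counts_sum]
  have hfst : r.1 = pvDel k (freqValues.map (·.2)) 0 := by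
    rw [hr, pvLoop1_fst k freqValues 0 freq]
  have hdn : (S.length : Int) ≤ (arr.length : Int) := by
    exact_mod_cast PySem.Set.length_ofList_le arr
  by_cases hk : k < 0
  · -- loop 1 ends with deletions = k or 0 < k was never reached; phase 2 is skipped
    have hdel := pvDel_of_neg k hk (freqValues.map (·.2)) hpos
    have hnotlt : ¬ r.1 < k := by rw [hfst]; rcases hdel with h | h <;> omega
    rw [if_neg hnotlt, hdlen, if_pos (by omega)]
  · rw [not_lt] at hk
    have hsum1 : ((freqValues.map (·.2)).map (fun c => c - 1)).sum
        = (arr.length : Int) - (S.length : Int) := by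
      rw [sum_map_sub_one, hsumc, hcountsPerm.length_eq, List.length_map]
    have hdel : r.1 = min k ((arr.length : Int) - (S.length : Int)) := by
      rw [hfst, pvDel_of_nonneg k _ 0 hpos hk, hsum1]; ring_nf
    by_cases hkd : k ≤ (arr.length : Int) - (S.length : Int)
    · -- budget fits among the duplicates: deletions = k, phase 2 skipped
      have hnotlt : ¬ r.1 < k := by omega
      rw [if_neg hnotlt, hdlen, if_pos hkd]
    · -- deletions = n - d < k: phase 2 erases k - (n - d) keys
      rw [not_le] at hkd
      have hlt : r.1 < k := by omega
      rw [if_pos hlt, if_neg (not_le.2 hkd),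
        pvLoop2_size k r.2.keys r.1 r.2 rfl (by rw [hkeys1]; exact hnd) (by omega), hkeys1]
      omega
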